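-- pv_equiv track=rewrite | github.com/mastersamasama/kiho | plugins/kiho/skills/_meta/skill-create/scripts/score_description.py | rule_4_third_person
-- ===== SOURCE A (Python) =====
-- FIRST_PERSON = [" i ", " me ", " my ", " mine ", " we ", " us ", " our ", " ours "]
--
-- SECOND_PERSON = [" you ", " your ", " yours ", " yourself "]
--
-- def _padded_lower(desc: str) -> str:
--     """Lowercase with leading+trailing space for reliable word-boundary matching."""
--     return " " + desc.lower().replace("\n", " ").replace("\t", " ") + " "
--
-- def rule_4_third_person(desc: str) -> tuple[bool, str]:
--     """No first-person or second-person pronouns."""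
--     lower = _padded_lower(desc)
--     first_hits = [p.strip() for p in FIRST_PERSON if p in lower]
--     second_hits = [p.strip() for p in SECOND_PERSON if p in lower]
--     if not first_hits and not second_hits:
--         return True, "third-person only"
--     problems = []
--     if first_hits:
--         problems.append(f"first-person: {first_hits}")
--     if second_hits:
--         problems.append(f"second-person: {second_hits}")
--     return False, f"wrong voice — {'; '.join(problems)}"
-- ===== SOURCE B (Python) =====
-- _GROUPS = [
--     ("first-person", ["i", "me", "my", "mine", "we", "us", "our", "ours"]),
--     ("second-person", ["you", "your", "yours", "yourself"]),
-- ]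
--
--
-- def rule_4_third_person(desc: str) -> tuple[bool, str]:
--     """No first-person or second-person pronouns."""
--     tokens = set(desc.lower().replace("\n", " ").replace("\t", " ").split(" "))
--     pairs = [(label, [w for w in words if w in tokens]) for label, words in _GROUPS]
--     problems = [f"{label}: {hits}" for label, hits in pairs if hits]
--     if not problems:
--         return True, "third-person only"
--     return False, "wrong voice — " + "; ".join(problems)
-- ===== Notes on version B (the rewrite author's own statement) =====
-- stated objective: idiomatic
-- what changed: A pads/lowercases the whole description and runs twelve separate padded-substring scans over the full string, then assembles the message with two imperative if-append blocks; B tokenizes the lowercased text once by splitting on the single space character into a set of words, checks the pronouns by set membership, and builds the message declaratively from a labeled-groups table with comprehensions.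
import Mathlib
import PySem

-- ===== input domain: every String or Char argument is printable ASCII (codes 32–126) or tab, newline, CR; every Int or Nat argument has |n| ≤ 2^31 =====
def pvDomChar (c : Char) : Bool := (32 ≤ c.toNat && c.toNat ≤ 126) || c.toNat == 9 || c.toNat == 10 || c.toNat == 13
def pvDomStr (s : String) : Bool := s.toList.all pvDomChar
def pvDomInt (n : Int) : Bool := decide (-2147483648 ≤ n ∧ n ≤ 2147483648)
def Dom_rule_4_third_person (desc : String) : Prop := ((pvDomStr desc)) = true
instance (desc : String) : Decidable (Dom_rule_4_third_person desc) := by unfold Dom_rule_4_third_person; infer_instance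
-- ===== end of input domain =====

-- B replaces A's twelve padded-substring scans and imperative message assembly by one split(' ')
-- tokenization into a set plus a declarative labeled-groups table (objective: idiomatic).

-- Python 'a + b' on strings, exact (kept off Lean's opaque String.append)
def pyCat (a b : String) : String := String.ofList (a.toList ++ b.toList)

-- Python f"{xs}" for a list of strings, exact when no element needs escaping
-- (both programs only ever format hit lists drawn from the twelve fixed lowercase words)
def pyReprList (xs : List String) : String :=
  pyCat (pyCat "[" (PySem.Str.join ", " (xs.map (fun s => pyCat "'" (pyCat s "'"))))) "]"

-- ===== PORT A =====
def FIRST_PERSON : List String := [" i ", " me ", " my ", " mine ", " we ", " us ", " our ", " ours "]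

def SECOND_PERSON : List String := [" you ", " your ", " yours ", " yourself "]

def paddedLower (desc : String) : String :=
  pyCat (pyCat " " (PySem.Str.replace (PySem.Str.replace (PySem.Str.lower desc) "\n" " ") "\t" " ")) " "

def rule_4_third_person (desc : String) : Bool × String :=
  let lower := paddedLower desc
  let first_hits := (FIRST_PERSON.filter (fun p => PySem.Str.isIn p lower)).map PySem.Str.strip
  let second_hits := (SECOND_PERSON.filter (fun p => PySem.Str.isIn p lower)).map PySem.Str.strip
  if first_hits = [] ∧ second_hits = [] then (true, "third-person only")
  else
    let problems : List String := []
    let problems := if first_hits ≠ [] then problems ++ [pyCat "first-person: " (pyReprList first_hits)] else problems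
    let problems := if second_hits ≠ [] then problems ++ [pyCat "second-person: " (pyReprList second_hits)] else problems
    (false, pyCat "wrong voice — " (PySem.Str.join "; " problems))

-- ===== PORT B =====
def GROUPS : List (String × List String) :=
  [("first-person", ["i", "me", "my", "mine", "we", "us", "our", "ours"]),
   ("second-person", ["you", "your", "yours", "yourself"])]

-- Source B's str.split(" ") (nonempty separator) is PySem.Chars.splitOn on the code points
def rule_4_third_person_alt (desc : String) : Bool × String :=
  let cleaned := PySem.Chars.replace (PySem.Chars.replace (PySem.Chars.lower desc.toList) ['\n'] [' ']) ['\t'] [' ']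
  let tokens : PySem.Set (List Char) := PySem.Set.ofList (PySem.Chars.splitOn cleaned [' '])
  let pairs := GROUPS.map (fun g => (g.1, g.2.filter (fun w => tokens.contains w.toList)))
  let problems := (pairs.filter (fun g => g.2 ≠ [])).map (fun g => pyCat g.1 (pyCat ": " (pyReprList g.2)))
  if problems = [] then (true, "third-person only")
  else (false, pyCat "wrong voice — " (PySem.Str.join "; " problems))

-- ===== PRECONDITION & SPEC =====
def Spec_rule_4_third_person (desc : String) (out : Bool × String) : Prop := out = rule_4_third_person_alt desc
instance (desc : String) (out : Bool × String) : Decidable (Spec_rule_4_third_person desc out) := by unfold Spec_rule_4_third_person; infer_instance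

-- ===== CLAIM (what is proved, stated in full; the proofs are below) =====
def Claim_equal_rule_4_third_person : Prop := ∀ (desc : String), Dom_rule_4_third_person desc → Spec_rule_4_third_person desc (rule_4_third_person desc)

-- ===== LEMMAS AND PROOFS =====

-- what A's two replace calls do to a character
def subChar (c : Char) : Char := if c = '\n' ∨ c = '\t' then ' ' else c

-- split on ' ' with a word accumulator (reference form of both B's splitOn and A's padding)
def tokS : List Char → List Char → List (List Char)
  | w, [] => [w]
  | w, c :: cs => if c = ' ' then w :: tokS [] cs else tokS (w ++ [c]) cs

def padStr (w : String) : String := String.ofList (' ' :: (w.toList ++ [' ']))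

def cleanedOf (desc : String) : List Char :=
  PySem.Chars.replace (PySem.Chars.replace (PySem.Chars.lower desc.toList) ['\n'] [' ']) ['\t'] [' ']

lemma replace_go_single (a b : Char) : ∀ (fuel : Nat) (l acc : List Char), l.length ≤ fuel →
    PySem.Chars.replace.go [a] [b] fuel l acc = acc.reverse ++ l.map (fun c => if c = a then b else c) := by
  intro fuel
  induction fuel with
  | zero =>
    intro l acc h
    have : l = [] := by cases l <;> simp_all
    subst this; simp [PySem.Chars.replace.go]
  | succ n ih =>
    intro l acc h
    cases l with
    | nil => simp [PySem.Chars.replace.go]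
    | cons c t =>
      have ht : t.length ≤ n := by simpa using h
      by_cases hc : a = c
      · subst hc
        have hpre : [a].isPrefixOf (a :: t) = true := by simp [List.isPrefixOf]
        rw [show PySem.Chars.replace.go [a] [b] (n + 1) (a :: t) acc
              = PySem.Chars.replace.go [a] [b] n t (b :: acc) from by
            simp [PySem.Chars.replace.go, hpre], ih t (b :: acc) ht]
        simp
      · have hpre : [a].isPrefixOf (c :: t) = false := by
          simp only [List.isPrefixOf, Bool.and_eq_false_iff, beq_eq_false_iff_ne, ne_eq]
          exact Or.inl hc
        rw [show PySem.Chars.replace.go [a] [b] (n + 1) (c :: t) acc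
              = PySem.Chars.replace.go [a] [b] n t (c :: acc) from by
            simp [PySem.Chars.replace.go, hpre], ih t (c :: acc) ht]
        have hc' : ¬ c = a := fun h' => hc h'.symm
        simp [hc']

lemma replace_single (a b : Char) (l : List Char) :
    PySem.Chars.replace l [a] [b] = l.map (fun c => if c = a then b else c) := by
  simp [PySem.Chars.replace, replace_go_single a b l.length l [] le_rfl]

lemma cleaned_eq_map (desc : String) :
    cleanedOf desc = (PySem.Chars.lower desc.toList).map subChar := by
  simp only [cleanedOf, replace_single, List.map_map]
  apply List.map_congr_left
  intro c _
  by_cases h1 : c = '\n'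
  · subst h1; decide
  · by_cases h2 : c = '\t'
    · subst h2; decide
    · simp [subChar, h1, h2]

lemma padded_toList (desc : String) :
    (paddedLower desc).toList = ' ' :: ((PySem.Chars.lower desc.toList).map subChar ++ [' ']) := by
  simp only [paddedLower, pyCat]
  simp [replace_single, List.map_map]
  intro c _
  by_cases h1 : c = '\n'
  · subst h1; decide
  · by_cases h2 : c = '\t'
    · subst h2; decide
    · simp [subChar, h1, h2]

lemma splitOn_go_space : ∀ (fuel : Nat) (l cur : List Char) (acc : List (List Char)),
    l.length < fuel →
    PySem.Chars.splitOn.go [' '] fuel l cur acc = acc.reverse ++ tokS cur.reverse l := by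
  intro fuel
  induction fuel with
  | zero => intro l cur acc h; omega
  | succ n ih =>
    intro l cur acc h
    cases l with
    | nil => simp [PySem.Chars.splitOn.go, tokS]
    | cons c t =>
      have ht : t.length < n := by simpa using h
      by_cases hc : c = ' '
      · subst hc
        have hpre : [' '].isPrefixOf (' ' :: t) = true := by simp [List.isPrefixOf]
        rw [show PySem.Chars.splitOn.go [' '] (n + 1) (' ' :: t) cur acc
              = PySem.Chars.splitOn.go [' '] n t [] (cur.reverse :: acc) from by
            simp [PySem.Chars.splitOn.go, hpre], ih t [] (cur.reverse :: acc) ht]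
        simp [tokS]
      · have hpre : [' '].isPrefixOf (c :: t) = false := by
          simp only [List.isPrefixOf, Bool.and_eq_false_iff, beq_eq_false_iff_ne, ne_eq]
          exact Or.inl (fun h' => hc h'.symm)
        rw [show PySem.Chars.splitOn.go [' '] (n + 1) (c :: t) cur acc
              = PySem.Chars.splitOn.go [' '] n t (c :: cur) acc from by
            simp [PySem.Chars.splitOn.go, hpre], ih t (c :: cur) acc ht]
        simp [tokS, hc]

lemma splitOn_space_eq_tokS (l : List Char) :
    PySem.Chars.splitOn l [' '] = tokS [] l := by
  simp [PySem.Chars.splitOn, splitOn_go_space (l.length + 1) l [] [] (by omega)]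

lemma prefix_word : ∀ (w u r : List Char), (∀ c ∈ w, c ≠ ' ') → (∀ c ∈ u, c ≠ ' ') →
    ((w ++ [' ']) <+: (u ++ [' '] ++ r) ↔ w = u) := by
  intro w
  induction w with
  | nil =>
    intro u r _ hu
    cases u with
    | nil => simp
    | cons d u' =>
      have hd : d ≠ ' ' := hu d (by simp)
      have hd' : ¬ (' ' = d) := fun h => hd h.symm
      simp [List.cons_prefix_cons, hd']
  | cons c w' ih =>
    intro u r hw hu
    have hc : c ≠ ' ' := hw c (by simp)
    cases u with
    | nil => simp [List.cons_prefix_cons, hc]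
    | cons d u' =>
      simp only [List.cons_append, List.cons_prefix_cons, List.cons.injEq]
      rw [ih u' r (fun x hx => hw x (by simp [hx])) (fun x hx => hu x (by simp [hx]))]

lemma infix_space_skip : ∀ (u t l : List Char), (∀ c ∈ u, c ≠ ' ') →
    ((' ' :: l) <:+: (u ++ ' ' :: t) ↔ (' ' :: l) <:+: (' ' :: t)) := by
  intro u
  induction u with
  | nil => intro t l _; simp
  | cons c u' ih =>
    intro t l hu
    have hc : c ≠ ' ' := hu c (by simp)
    constructor
    · intro h
      rw [List.cons_append, List.infix_cons_iff] at h
      rcases h with h | h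
      · rw [List.cons_prefix_cons] at h
        exact absurd h.1.symm hc
      · exact (ih t l (fun x hx => hu x (by simp [hx]))).mp h
    · intro h
      have hsuf : (' ' :: t) <:+ ((c :: u') ++ ' ' :: t) := List.suffix_append (c :: u') (' ' :: t)
      exact h.trans hsuf.isInfix

lemma count_space_eq_zero (w : List Char) (hw : ∀ c ∈ w, c ≠ ' ') : w.count ' ' = 0 := by
  simp only [List.count_eq_zero]
  intro h
  exact hw ' ' h rfl

lemma main_tok (w : List Char) (hw : ∀ c ∈ w, c ≠ ' ') :
    ∀ (m u : List Char), (∀ c ∈ u, c ≠ ' ') →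
    ((' ' :: (w ++ [' '])) <:+: (' ' :: (u ++ m ++ [' '])) ↔ w ∈ tokS u m) := by
  intro m
  induction m with
  | nil =>
    intro u hu
    simp only [List.append_nil, tokS, List.mem_singleton]
    constructor
    · intro h
      rw [List.infix_cons_iff] at h
      rcases h with h | h
      · rw [List.cons_prefix_cons] at h
        have h2 := h.2
        rw [show u ++ [' '] = u ++ [' '] ++ [] from by simp] at h2
        exact (prefix_word w u [] hw hu).mp h2
      · exfalso
        have hcnt := h.count_le ' '
        simp [count_space_eq_zero w hw, count_space_eq_zero u hu] at hcnt
    · intro h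
      subst h
      exact List.prefix_rfl.isInfix
  | cons c m' ih =>
    intro u hu
    by_cases hc : c = ' '
    · subst hc
      have hts : tokS u (' ' :: m') = u :: tokS [] m' := by simp [tokS]
      rw [hts, List.mem_cons]
      constructor
      · intro h
        rcases List.infix_cons_iff.mp h with h | h
        · left
          rw [List.cons_prefix_cons] at h
          have h2 := h.2
          rw [show u ++ ' ' :: m' ++ [' '] = u ++ [' '] ++ (m' ++ [' ']) from by simp] at h2
          exact (prefix_word w u (m' ++ [' ']) hw hu).mp h2
        · right
          rw [show u ++ ' ' :: m' ++ [' '] = u ++ ' ' :: (m' ++ [' ']) from by simp,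
              infix_space_skip u (m' ++ [' ']) (w ++ [' ']) hu] at h
          exact (ih [] (by simp)).mp (by simpa using h)
      · rintro (rfl | h)
        · refine List.IsPrefix.isInfix ?_
          rw [List.cons_prefix_cons]
          refine ⟨rfl, ?_⟩
          rw [show w ++ ' ' :: m' ++ [' '] = (w ++ [' ']) ++ (m' ++ [' ']) from by simp]
          exact List.prefix_append _ _
        · have h2 := (ih [] (by simp)).mpr h
          refine List.infix_cons_iff.mpr (Or.inr ?_)
          rw [show u ++ ' ' :: m' ++ [' '] = u ++ ' ' :: (m' ++ [' ']) from by simp,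
              infix_space_skip u (m' ++ [' ']) (w ++ [' ']) hu]
          simpa using h2
    · simp only [tokS, if_neg hc]
      rw [show u ++ c :: m' ++ [' '] = (u ++ [c]) ++ m' ++ [' '] from by simp]
      exact ih (u ++ [c]) (by
        intro x hx
        rcases List.mem_append.mp hx with hx | hx
        · exact hu x hx
        · simp at hx; subst hx; exact hc)

lemma hit_iff (desc : String) (w : List Char) (hw : ∀ c ∈ w, c ≠ ' ') :
    (PySem.Chars.isIn (' ' :: (w ++ [' '])) (paddedLower desc).toList = true) ↔
      w ∈ tokS [] (cleanedOf desc) := by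
  rw [PySem.Chars.isIn_iff_infix, padded_toList, cleaned_eq_map]
  have := main_tok w hw ((PySem.Chars.lower desc.toList).map subChar) [] (by simp)
  simpa using this

lemma q_eq (desc : String) (w : String) (hw : ∀ c ∈ w.toList, c ≠ ' ') :
    PySem.Str.isIn (padStr w) (paddedLower desc)
      = (PySem.Set.ofList (PySem.Chars.splitOn (cleanedOf desc) [' '])).contains w.toList := by
  rw [Bool.eq_iff_iff]
  rw [PySem.Str.isIn_eq]
  have h1 : (padStr w).toList = ' ' :: (w.toList ++ [' ']) := by simp [padStr]
  rw [h1, hit_iff desc w.toList hw, splitOn_space_eq_tokS]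
  simp [PySem.Set.mem_ofList]

lemma map_strip_filter_map (q q' : String → Bool) :
    ∀ ws : List String, (∀ w ∈ ws, q (padStr w) = q' w ∧ PySem.Str.strip (padStr w) = w) →
    ((ws.map padStr).filter q).map PySem.Str.strip = ws.filter q' := by
  intro ws
  induction ws with
  | nil => intro _; simp
  | cons w ws' ih =>
    intro h
    have hw := h w (by simp)
    have ihh := ih (fun x hx => h x (by simp [hx]))
    simp only [List.map_cons, List.filter_cons, hw.1]
    cases hq : q' w <;> simp [hw.2, ihh]

set_option maxRecDepth 8192 in
lemma first_hits_eq (desc : String) :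
    ((FIRST_PERSON.filter (fun p => PySem.Str.isIn p (paddedLower desc))).map PySem.Str.strip)
      = (["i", "me", "my", "mine", "we", "us", "our", "ours"] : List String).filter
          (fun w => (PySem.Set.ofList (PySem.Chars.splitOn (cleanedOf desc) [' '])).contains w.toList) := by
  rw [show FIRST_PERSON = (["i", "me", "my", "mine", "we", "us", "our", "ours"] : List String).map padStr from by decide]
  apply map_strip_filter_map
  intro w hw
  simp only [List.mem_cons, List.not_mem_nil, or_false] at hw
  rcases hw with rfl | rfl | rfl | rfl | rfl | rfl | rfl | rfl <;>
    exact ⟨q_eq desc _ (by simp), by decide⟩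

set_option maxRecDepth 8192 in
lemma second_hits_eq (desc : String) :
    ((SECOND_PERSON.filter (fun p => PySem.Str.isIn p (paddedLower desc))).map PySem.Str.strip)
      = (["you", "your", "yours", "yourself"] : List String).filter
          (fun w => (PySem.Set.ofList (PySem.Chars.splitOn (cleanedOf desc) [' '])).contains w.toList) := by
  rw [show SECOND_PERSON = (["you", "your", "yours", "yourself"] : List String).map padStr from by decide]
  apply map_strip_filter_map
  intro w hw
  simp only [List.mem_cons, List.not_mem_nil, or_false] at hw
  rcases hw with rfl | rfl | rfl | rfl <;>
    exact ⟨q_eq desc _ (by simp), by decide⟩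

lemma pyCat_label (lbl s : String) : pyCat lbl (pyCat ": " s) = pyCat (pyCat lbl ": ") s := by
  simp [pyCat]

-- ===== VERDICT (by name: the statement is the Claim_ definition above) =====
theorem rule_4_third_person_spec : Claim_equal_rule_4_third_person := by
  intro desc _
  show rule_4_third_person desc = rule_4_third_person_alt desc
  simp only [rule_4_third_person, rule_4_third_person_alt, GROUPS, List.map_cons, List.map_nil]
  rw [show (PySem.Chars.replace (PySem.Chars.replace (PySem.Chars.lower desc.toList) ['\n'] [' ']) ['\t'] [' '])
        = cleanedOf desc from rfl]
  rw [first_hits_eq, second_hits_eq]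
  set F := (["i", "me", "my", "mine", "we", "us", "our", "ours"] : List String).filter
      (fun w => (PySem.Set.ofList (PySem.Chars.splitOn (cleanedOf desc) [' '])).contains w.toList) with hF
  set S := (["you", "your", "yours", "yourself"] : List String).filter
      (fun w => (PySem.Set.ofList (PySem.Chars.splitOn (cleanedOf desc) [' '])).contains w.toList) with hS
  clear hF hS
  have e1 : pyCat "first-person" ": " = "first-person: " := by decide
  have e2 : pyCat "second-person" ": " = "second-person: " := by decide
  by_cases hf : F = [] <;> by_cases hs : S = [] <;>
    simp [hf, hs, pyCat_label, e1, e2]
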